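-- pv_equiv track=rewrite | github.com/Bredeem/AdventOfCode | 2024/d09/script.py | find_available_space
-- ===== SOURCE A (Python) =====
-- def find_available_space(disk, size):
--     start = -1
--     for i, block in enumerate(disk):
--         if start == -1:
--             if block == ".":
--                 start = i
--         else:
--             if block != ".":
--                 if i - start >= size:
--                     return start
--                 start = -1
--     return -1
-- ===== SOURCE B (Python) =====
-- def find_available_space(disk, size):
--     # Run-length encode disk into (block, start-index) runs, then scan
--     # consecutive run pairs: a '.' run qualifies only when some run follows it
--     # (its end index is then known), which the zip over adjacent pairs gives for free.
--     runs = []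
--     for i, b in enumerate(disk):
--         if not runs or runs[-1][0] != b:
--             runs.append((b, i))
--     for (b, st), (_, nxt) in zip(runs, runs[1:]):
--         if b == "." and nxt - st >= size:
--             return st
--     return -1
-- ===== Notes on version B (the rewrite author's own statement) =====
-- stated objective: alternative
-- what changed: Replaces A's stateful single pass (tracking the current gap start in a sentinel variable) by a two-phase decomposition: run-length encode the disk into (block, start) runs, then scan adjacent run pairs for a '.' run of sufficient length.
import Mathlib
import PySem

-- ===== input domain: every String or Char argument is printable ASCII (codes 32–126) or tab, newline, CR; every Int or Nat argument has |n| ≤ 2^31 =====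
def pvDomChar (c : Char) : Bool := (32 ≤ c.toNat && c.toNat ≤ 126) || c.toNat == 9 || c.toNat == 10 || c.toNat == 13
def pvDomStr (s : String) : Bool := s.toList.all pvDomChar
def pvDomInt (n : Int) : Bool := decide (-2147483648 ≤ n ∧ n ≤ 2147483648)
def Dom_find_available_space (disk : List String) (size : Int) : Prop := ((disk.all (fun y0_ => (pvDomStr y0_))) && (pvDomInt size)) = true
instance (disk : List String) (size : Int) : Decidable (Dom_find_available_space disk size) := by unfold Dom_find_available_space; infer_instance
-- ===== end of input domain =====

-- B re-implements A as run-length-encoding + adjacent-pair scan (alternative decomposition; same cost).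

-- ===== PORT A =====
-- A's loop: state `start` (-1 = not in a gap), early return inside the loop.
def goA (size : Int) : List String → Int → Int → Int
  | [], _, _ => -1
  | b :: rest, i, start =>
    if start = -1 then
      if b = "." then goA size rest (i + 1) i
      else goA size rest (i + 1) start
    else
      if b ≠ "." then
        if i - start ≥ size then start
        else goA size rest (i + 1) (-1)
      else goA size rest (i + 1) start

def find_available_space (disk : List String) (size : Int) : Int :=
  goA size disk 0 (-1)

-- ===== PORT B =====
-- B phase 1: `runs.append((b,i))` unless the last run has the same key.
def rleLoop : List String → Int → List (String × Int) → List (String × Int)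
  | [], _, runs => runs
  | b :: rest, i, runs =>
    let runs' := if runs = [] ∨ (runs.getLast?.map Prod.fst) ≠ some b then runs ++ [(b, i)] else runs
    rleLoop rest (i + 1) runs'

-- B phase 2: scan of `zip(runs, runs[1:])`.
def scanPairs (size : Int) : List ((String × Int) × (String × Int)) → Int
  | [] => -1
  | ((b, st), (_, nxt)) :: t =>
    if b = "." ∧ nxt - st ≥ size then st else scanPairs size t

def find_available_space_alt (disk : List String) (size : Int) : Int :=
  let runs := rleLoop disk 0 []
  scanPairs size (List.zip runs runs.tail)

-- ===== PRECONDITION & SPEC =====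
def Spec_find_available_space (disk : List String) (size : Int) (out : Int) : Prop := out = find_available_space_alt disk size
instance (disk : List String) (size : Int) (out : Int) : Decidable (Spec_find_available_space disk size out) := by unfold Spec_find_available_space; infer_instance

-- ===== CLAIM (what is proved, stated in full; the proofs are below) =====
def Claim_equal_find_available_space : Prop := ∀ (disk : List String) (size : Int), Dom_find_available_space disk size → Spec_find_available_space disk size (find_available_space disk size)

-- ===== LEMMAS AND PROOFS =====

-- `mergeWith k rs` drops the first run of `rs` when its key is `k` (it merges into the run in progress).
def mergeWith (k : String) : List (String × Int) → List (String × Int)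
  | [] => []
  | (k', j) :: t => if k' = k then t else (k', j) :: t

-- Proof-side structural RLE (cons-based).
def runsOf : List String → Int → List (String × Int)
  | [], _ => []
  | b :: rest, i => (b, i) :: mergeWith b (runsOf rest (i + 1))

def scanRuns (size : Int) : List (String × Int) → Int
  | (b, st) :: (b2, nxt) :: t =>
    if b = "." ∧ nxt - st ≥ size then st else scanRuns size ((b2, nxt) :: t)
  | _ => -1

theorem scanPairs_zip (size : Int) (runs : List (String × Int)) :
    scanPairs size (List.zip runs runs.tail) = scanRuns size runs := by
  match runs with
  | [] => simp [scanPairs, scanRuns]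
  | [(b, st)] => simp [scanPairs, scanRuns]
  | (b, st) :: (b2, nxt) :: t =>
    simp only [List.tail, List.zip_cons_cons, scanPairs, scanRuns]
    split
    · rfl
    · exact scanPairs_zip size ((b2, nxt) :: t)

theorem rleLoop_inv (l : List String) (i : Int) (runs : List (String × Int))
    (k : String) (hk : (runs.getLast?.map Prod.fst) = some k) :
    rleLoop l i runs = runs ++ mergeWith k (runsOf l i) := by
  induction l generalizing i runs k with
  | nil => simp [rleLoop, runsOf, mergeWith]
  | cons b rest ih =>
    have hne : runs ≠ [] := by
      intro h; rw [h] at hk; simp at hk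
    simp only [rleLoop, runsOf]
    by_cases hbk : k = b
    · subst hbk
      have hc : ¬ (runs = [] ∨ (runs.getLast?.map Prod.fst) ≠ some k) := by
        rintro (h | h)
        · exact hne h
        · exact h hk
      rw [if_neg hc, ih (i + 1) runs k hk]
      simp [mergeWith]
    · have hc : runs = [] ∨ (runs.getLast?.map Prod.fst) ≠ some b := by
        right; rw [hk]; simp [hbk]
      rw [if_pos hc, ih (i + 1) (runs ++ [(b, i)]) b (by simp)]
      simp [mergeWith, Ne.symm hbk]

theorem rleLoop_nil (l : List String) (i : Int) :
    rleLoop l i [] = runsOf l i := by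
  cases l with
  | nil => simp [rleLoop, runsOf]
  | cons b rest =>
    simp only [rleLoop, runsOf]
    rw [if_pos (Or.inl trivial), List.nil_append]
    rw [rleLoop_inv rest (i + 1) [(b, i)] b (by simp)]
    simp

-- Dropping a leading non-'.' run does not change the scan result.
theorem scanRuns_drop (size : Int) (b : String) (i : Int) (runs : List (String × Int))
    (hb : b ≠ ".") : scanRuns size ((b, i) :: runs) = scanRuns size runs := by
  cases runs with
  | nil => simp [scanRuns]
  | cons p t =>
    obtain ⟨b2, j⟩ := p
    simp [scanRuns, hb]

-- A non-'.' run plus the merged continuation scans like the continuation itself.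
theorem scanRuns_cons_merge (size : Int) (b : String) (i : Int) (rs : List (String × Int))
    (hb : b ≠ ".") :
    scanRuns size ((b, i) :: mergeWith b rs) = scanRuns size rs := by
  cases rs with
  | nil => simp [mergeWith, scanRuns]
  | cons p t =>
    obtain ⟨b2, j⟩ := p
    by_cases hb2 : b2 = b
    · subst hb2
      have hm : mergeWith b2 ((b2, j) :: t) = t := by simp [mergeWith]
      rw [hm, scanRuns_drop size b2 i t hb, scanRuns_drop size b2 j t hb]
    · have hm : mergeWith b ((b2, j) :: t) = (b2, j) :: t := by simp [mergeWith, hb2]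
      rw [hm]
      exact scanRuns_drop size b i _ hb

-- `mergeGap start rs`: the ongoing '.' gap starting at `start`, extended by the runs `rs`.
def mergeGap (start : Int) (rs : List (String × Int)) : List (String × Int) :=
  (".", start) :: mergeWith "." rs

-- Main invariant relating A's stateful loop to the run-based scan.
theorem goA_runs (size : Int) (l : List String) :
    ∀ i : Int, 0 ≤ i →
      (goA size l i (-1) = scanRuns size (runsOf l i)) ∧
      (∀ start : Int, start ≠ -1 →
        goA size l i start = scanRuns size (mergeGap start (runsOf l i))) := by
  induction l with
  | nil =>
    intro i hi
    constructor
    · simp [goA, runsOf, scanRuns]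
    · intro start hs; simp [goA, runsOf, mergeGap, mergeWith, scanRuns]
  | cons b rest ih =>
    intro i hi
    have ih' := ih (i + 1) (by omega)
    constructor
    · -- state start = -1
      by_cases hb : b = "."
      · subst hb
        have h1 : goA size ("." :: rest) i (-1) = goA size rest (i + 1) i := by
          simp [goA]
        rw [h1, (ih'.2 i (by omega))]
        rfl
      · have h1 : goA size (b :: rest) i (-1) = goA size rest (i + 1) (-1) := by
          simp [goA, hb]
        rw [h1, ih'.1, runsOf]
        exact (scanRuns_cons_merge size b i _ hb).symm
    · -- state start ≠ -1 : currently inside a gap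
      intro start hs
      by_cases hb : b = "."
      · subst hb
        have h1 : goA size ("." :: rest) i start = goA size rest (i + 1) start := by
          simp [goA, hs]
        rw [h1, ih'.2 start hs]
        simp [mergeGap, runsOf, mergeWith]
      · have h1 : goA size (b :: rest) i start =
            if i - start ≥ size then start else goA size rest (i + 1) (-1) := by
          simp [goA, hs, hb]
        have hmg : mergeGap start (runsOf (b :: rest) i)
            = (".", start) :: (b, i) :: mergeWith b (runsOf rest (i + 1)) := by
          simp [mergeGap, runsOf, mergeWith, hb]
        rw [h1, hmg]
        rw [scanRuns]
        by_cases hcond : i - start ≥ size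
        · rw [if_pos hcond, if_pos ⟨rfl, hcond⟩]
        · rw [if_neg hcond, if_neg (by rintro ⟨_, h⟩; exact hcond h)]
          rw [scanRuns_cons_merge size b i _ hb, ih'.1]

-- ===== VERDICT (by name: the statement is the Claim_ definition above) =====
theorem find_available_space_spec : Claim_equal_find_available_space := by
  intro disk size _
  unfold Spec_find_available_space find_available_space find_available_space_alt
  rw [rleLoop_nil, scanPairs_zip]
  exact (goA_runs size disk 0 (by norm_num)).1
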